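-- pv_equiv track=rewrite | github.com/marcelpetrick/pythonCollection | ProjectEuler/problem040_champernownesNumber.py | createChampernowneNumberOfXDigits
-- ===== SOURCE A (Python) =====
-- def createChampernowneNumberOfXDigits(digits):
--     if digits < 1:
--         raise ValueError("Bad luck for you today, only for digits bigger 0 defined.")
--
--     returnValue = ""
--     firstItem = 1
--     while len(returnValue) < digits:
--         returnValue += str(firstItem)
--         firstItem -=- 1
--
--     # of course, since just > is checked, the returned string is at least "digits" long, most likely longer
--     # truncation won't be done, because this won't matter for the solution
--     return returnValue
-- ===== SOURCE B (Python) =====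
-- def createChampernowneNumberOfXDigits(digits):
--     if digits < 1:
--         raise ValueError("Bad luck for you today, only for digits bigger 0 defined.")
--
--     # Walk over digit-length blocks (1..9, 10..99, ...) to find analytically the
--     # smallest m whose cumulative Champernowne length reaches `digits`, then join once.
--     total = 0   # length contributed by all numbers below `start`
--     d = 1       # digit count of the current block
--     start = 1   # first number of the current block (10**(d-1))
--     while total + 9 * start * d < digits:
--         total += 9 * start * d
--         d += 1
--         start *= 10
--     m = start + (digits - total + d - 1) // d - 1
--     return ''.join(str(i) for i in range(1, m + 1))
-- ===== Notes on version B (the rewrite author's own statement) =====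
-- stated objective: alternative
-- what changed: B computes the stopping integer m analytically by iterating over digit-length blocks (9 one-digit, 90 two-digit, ...) instead of growing the string one number at a time, then joins str(1..m) in one pass.
import Mathlib
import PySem

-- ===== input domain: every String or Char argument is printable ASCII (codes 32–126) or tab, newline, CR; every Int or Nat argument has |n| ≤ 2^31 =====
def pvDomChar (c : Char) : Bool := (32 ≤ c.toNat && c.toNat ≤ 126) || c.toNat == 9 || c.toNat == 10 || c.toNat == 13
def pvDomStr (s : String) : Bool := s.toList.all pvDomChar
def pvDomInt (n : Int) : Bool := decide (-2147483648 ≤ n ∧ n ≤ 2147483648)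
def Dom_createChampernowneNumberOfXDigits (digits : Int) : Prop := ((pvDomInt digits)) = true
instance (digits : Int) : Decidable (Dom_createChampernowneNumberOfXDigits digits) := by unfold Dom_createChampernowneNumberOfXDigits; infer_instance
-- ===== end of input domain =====

-- B replaces A's grow-string-until-long-enough loop by a block-wise analytic computation of the
-- stopping integer m followed by one join of str(1..m); equality of the returned string is proved
-- for every digits ≥ 1 (A raises ValueError for digits < 1, excluded by Pre_).
-- Both loop ports carry a fuel parameter solely as a totality guard; digits.toNat steps always
-- suffice (each A-iteration adds ≥ 1 character, each B-iteration adds ≥ 9 to total).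

-- ===== PORT A =====
-- while len(returnValue) < digits: returnValue += str(firstItem); firstItem += 1
def pvALoop (digits : Int) (returnValue : List Char) (firstItem : Int) : Nat → List Char
  | 0 => returnValue
  | fuel + 1 =>
    if ((returnValue.length : Int)) < digits then
      pvALoop digits (returnValue ++ PySem.Int.toChars firstItem) (firstItem + 1) fuel
    else returnValue

def createChampernowneNumberOfXDigits (digits : Int) : String :=
  String.ofList (pvALoop digits [] 1 digits.toNat)

-- ===== PORT B =====
-- while total + 9*start*d < digits: total += 9*start*d; d += 1; start *= 10
def pvBBlocks (digits : Int) (total d start : Nat) : Nat → Nat × Nat × Nat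
  | 0 => (total, d, start)
  | fuel + 1 =>
    if ((total : Int)) + 9 * start * d < digits then
      pvBBlocks digits (total + 9 * start * d) (d + 1) (start * 10) fuel
    else (total, d, start)

-- m = start + ceil((digits - total) / d) - 1; return ''.join(str(i) for i in range(1, m + 1))
def createChampernowneNumberOfXDigits_alt (digits : Int) : String :=
  match pvBBlocks digits 0 1 1 digits.toNat with
  | (total, d, start) =>
    let m : Int := (start : Int) + PySem.Int.floordiv (digits - total + d - 1) d - 1
    String.ofList (((PySem.List.pyRange 1 (m + 1) 1).map PySem.Int.toChars).flatten)

-- ===== PRECONDITION & SPEC =====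
-- Python A raises ValueError for digits < 1; those inputs are outside Pre_.
def Pre_createChampernowneNumberOfXDigits (digits : Int) : Prop := 1 ≤ digits
instance (digits : Int) : Decidable (Pre_createChampernowneNumberOfXDigits digits) := by unfold Pre_createChampernowneNumberOfXDigits; infer_instance

def pvWitness_createChampernowneNumberOfXDigits : Int := 12

def Spec_createChampernowneNumberOfXDigits (digits : Int) (out : String) : Prop := out = createChampernowneNumberOfXDigits_alt digits
instance (digits : Int) (out : String) : Decidable (Spec_createChampernowneNumberOfXDigits digits out) := by unfold Spec_createChampernowneNumberOfXDigits; infer_instance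

-- ===== CLAIM (what is proved, stated in full; the proofs are below) =====
def Claim_equal_createChampernowneNumberOfXDigits : Prop := ∀ (digits : Int), Dom_createChampernowneNumberOfXDigits digits → Pre_createChampernowneNumberOfXDigits digits → Spec_createChampernowneNumberOfXDigits digits (createChampernowneNumberOfXDigits digits)

-- ===== LEMMAS AND PROOFS =====

-- S k = str(1) ++ … ++ str(k); L k its length
def pvS : Nat → List Char
  | 0 => []
  | k + 1 => pvS k ++ PySem.Int.toChars ((k + 1 : Nat) : Int)

def pvL (k : Nat) : Nat := (pvS k).length

theorem pvToCharsLen_pos (n : Int) : 0 < (PySem.Int.toChars n).length := by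
  unfold PySem.Int.toChars
  split
  · simp
  · exact Nat.length_toDigits_pos

theorem pvL_succ (k : Nat) : pvL (k + 1) = pvL k + (PySem.Int.toChars ((k + 1 : Nat) : Int)).length := by
  simp [pvL, pvS]

theorem pvL_mono : Monotone pvL := by
  apply monotone_nat_of_le_succ
  intro k
  rw [pvL_succ]
  omega

theorem pvL_ge (k : Nat) : k ≤ pvL k := by
  induction k with
  | zero => omega
  | succ k ih =>
    have := pvToCharsLen_pos ((k + 1 : Nat) : Int)
    rw [pvL_succ]
    omega

-- str(n) has exactly d digits for 10^(d-1) ≤ n < 10^d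
theorem pvToCharsLen_eq (d n : Nat) (hd : 0 < d) (h1 : 10 ^ (d - 1) ≤ n) (h2 : n < 10 ^ d) :
    (PySem.Int.toChars ((n : Nat) : Int)).length = d := by
  have hn : 0 < n := lt_of_lt_of_le (Nat.pow_pos (by norm_num)) h1
  unfold PySem.Int.toChars
  rw [if_neg (by omega)]
  simp only [Int.toNat_natCast]
  have hle : (Nat.toDigits 10 n).length ≤ d :=
    Nat.length_toDigits_le_iff (by norm_num) hd |>.mpr h2
  have hgt : ¬ (Nat.toDigits 10 n).length ≤ d - 1 := by
    intro hcon
    have hpos := @Nat.length_toDigits_pos 10 n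
    rcases Nat.lt_or_ge 1 d with h | h
    · have := (Nat.length_toDigits_le_iff (b := 10) (n := n) (k := d - 1) (by norm_num) (by omega)).mp hcon
      omega
    · omega
  omega

-- additive form of pvL within the d-digit block
theorem pvL_block (d : Nat) (hd : 0 < d) (c : Nat) (hc : c ≤ 9 * 10 ^ (d - 1)) :
    pvL (10 ^ (d - 1) - 1 + c) = pvL (10 ^ (d - 1) - 1) + c * d := by
  induction c with
  | zero => simp
  | succ c ih =>
    have hpow : 0 < 10 ^ (d - 1) := Nat.pow_pos (by norm_num)
    have hc' : c ≤ 9 * 10 ^ (d - 1) := by omega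
    have heq : 10 ^ (d - 1) - 1 + (c + 1) = (10 ^ (d - 1) - 1 + c) + 1 := by omega
    rw [heq, pvL_succ, ih hc']
    have h10 : (10 : ℕ) ^ d = 10 ^ (d - 1) * 10 := by
      conv_lhs => rw [show d = d - 1 + 1 from by omega]
      rw [pow_succ]
    have hlen : (PySem.Int.toChars (((10 ^ (d - 1) - 1 + c) + 1 : Nat) : Int)).length = d := by
      apply pvToCharsLen_eq d _ hd
      · omega
      · omega
    rw [hlen]
    ring

-- the block loop invariant: on exit, start = 10^(d-1), total = L(start-1), and
-- total < digits ≤ total + 9*start*d (the final block contains the stopping point)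
theorem pvBBlocks_spec (digits : Int) (fuel : Nat) :
    ∀ (total d start : Nat), 0 < d → 0 < start →
    start = 10 ^ (d - 1) → total = pvL (start - 1) →
    (total : Int) < digits → digits ≤ (total : Int) + fuel * 9 →
    (pvBBlocks digits total d start fuel).2.2 = 10 ^ ((pvBBlocks digits total d start fuel).2.1 - 1) ∧
    (pvBBlocks digits total d start fuel).1 = pvL ((pvBBlocks digits total d start fuel).2.2 - 1) ∧
    0 < (pvBBlocks digits total d start fuel).2.1 ∧
    0 < (pvBBlocks digits total d start fuel).2.2 ∧
    (((pvBBlocks digits total d start fuel).1 : Int)) < digits ∧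
    digits ≤ ((pvBBlocks digits total d start fuel).1 : Int) +
      9 * (pvBBlocks digits total d start fuel).2.2 * (pvBBlocks digits total d start fuel).2.1 := by
  induction fuel with
  | zero =>
    intro total d start hd hs hstart htotal hlt hfuel
    exfalso
    simp only [Nat.cast_zero, zero_mul, add_zero] at hfuel
    omega
  | succ fuel ih =>
    intro total d start hd hs hstart htotal hlt hfuel
    simp only [pvBBlocks]
    split
    · rename_i h
      have hpow : 0 < 10 ^ (d - 1) := Nat.pow_pos (by norm_num)
      have hnext : total + 9 * start * d = pvL (start * 10 - 1) := by
        have h1 : start * 10 - 1 = 10 ^ (d - 1) - 1 + 9 * 10 ^ (d - 1) := by rw [hstart]; omega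
        rw [h1, pvL_block d hd (9 * 10 ^ (d - 1)) le_rfl, ← hstart, ← htotal]
      have hstart' : start * 10 = 10 ^ ((d + 1) - 1) := by
        rw [show d + 1 - 1 = (d - 1) + 1 from by omega, pow_succ, hstart]
      have hsd9 : (9 : Int) ≤ 9 * start * d := by
        have h1 : (1 : Int) ≤ (start : Int) := by exact_mod_cast hs
        have h2 : (1 : Int) ≤ (d : Int) := by exact_mod_cast hd
        nlinarith
      apply ih (total + 9 * start * d) (d + 1) (start * 10)
        (by omega) (by omega) hstart' hnext (by push_cast; linarith [h])
      push_cast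
      push_cast at hfuel
      linarith
    · rename_i h
      exact ⟨hstart, by rw [htotal], hd, hs, hlt, not_lt.mp h⟩

-- A's loop, started after k (with k ≤ m and enough fuel), stops exactly at S m,
-- for m the least index whose cumulative length reaches digits
theorem pvALoop_eq (digits : Int) (m : Nat) (hm : digits ≤ (pvL m : Int))
    (hlt : ∀ j, j < m → (pvL j : Int) < digits) :
    ∀ (fuel k : Nat), k ≤ m → m ≤ k + fuel →
    pvALoop digits (pvS k) ((k : Int) + 1) fuel = pvS m := by
  intro fuel
  induction fuel with
  | zero =>
    intro k hk hfuel
    have : k = m := by omega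
    rw [this, pvALoop]
  | succ fuel ih =>
    intro k hk hfuel
    rw [pvALoop]
    split
    · rename_i h
      have hkm : k < m := by
        rcases Nat.lt_or_ge k m with h' | h'
        · exact h'
        · have : k = m := le_antisymm hk h'
          subst this
          simp only [pvL] at hm
          omega
      have hstep : pvS k ++ PySem.Int.toChars ((k : Int) + 1) = pvS (k + 1) := by
        simp [pvS]
      rw [hstep]
      have := ih (k + 1) hkm (by omega)
      simpa using this
    · rename_i h
      have hkm : ¬ k < m := by
        intro hkm
        exact h (by simpa [pvL] using hlt k hkm)
      have : k = m := by omega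
      rw [this]

-- the one-shot join over range(1, m+1) is S m
theorem pvJoin_eq (m : Nat) :
    ((PySem.List.pyRange 1 ((m : Int) + 1) 1).map PySem.Int.toChars).flatten = pvS m := by
  induction m with
  | zero => simp [PySem.List.pyRange_one_eq_nil, pvS]
  | succ m ih =>
    rw [show (((m + 1 : Nat) : Int) + 1) = ((m : Int) + 1) + 1 by push_cast; ring,
      PySem.List.pyRange_one_succ_right (by omega)]
    simp only [List.map_append, List.flatten_append, ih, List.map_cons, List.map_nil,
      List.flatten_cons, List.flatten_nil, List.append_nil]
    simp [pvS]

-- ===== VERDICT =====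
theorem createChampernowneNumberOfXDigits_spec : Claim_equal_createChampernowneNumberOfXDigits := by
  intro digits _ hpre
  unfold Pre_createChampernowneNumberOfXDigits at hpre
  unfold Spec_createChampernowneNumberOfXDigits
  have hspec := pvBBlocks_spec digits digits.toNat 0 1 1 one_pos one_pos (by norm_num)
    (by simp [pvL, pvS]) (by push_cast; omega) (by push_cast; omega)
  obtain ⟨hst, htot, hdpos, hspos, hlt, hle⟩ := hspec
  set B := pvBBlocks digits 0 1 1 digits.toNat with hB
  set T := B.1 with hT
  set D := B.2.1 with hD
  set ST := B.2.2 with hST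
  show String.ofList (pvALoop digits [] 1 digits.toNat) =
    String.ofList (((PySem.List.pyRange 1
      (((ST : Int) + PySem.Int.floordiv (digits - (T : Int) + (D : Int) - 1) (D : Int) - 1) + 1) 1).map
        PySem.Int.toChars).flatten)
  set q : Int := PySem.Int.floordiv (digits - (T : Int) + (D : Int) - 1) (D : Int) with hq
  have hDpos' : (0 : Int) < (D : Int) := by exact_mod_cast hdpos
  have hdm := PySem.Int.floordiv_mul_add_mod (digits - (T : Int) + (D : Int) - 1) (D : Int)
  rw [← hq] at hdm
  have hmod0 : 0 ≤ PySem.Int.mod (digits - (T : Int) + (D : Int) - 1) (D : Int) :=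
    PySem.Int.mod_nonneg _ hDpos'
  have hmodlt : PySem.Int.mod (digits - (T : Int) + (D : Int) - 1) (D : Int) < (D : Int) :=
    PySem.Int.mod_lt _ hDpos'
  have hqd1 : digits - (T : Int) ≤ q * D := by linarith
  have hexp : (q - 1) * (D : Int) = q * D - D := by ring
  have hqd2 : (q - 1) * (D : Int) < digits - (T : Int) := by rw [hexp]; linarith
  have hq1 : 1 ≤ q := by
    by_contra hcon
    push_neg at hcon
    have : q * (D : Int) ≤ 0 * (D : Int) := by
      apply mul_le_mul_of_nonneg_right (by omega) (le_of_lt hDpos')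
    simp at this
    linarith
  have hq2 : q ≤ 9 * (ST : Int) := by
    by_contra hcon
    push_neg at hcon
    have : (9 * (ST : Int) + 1) * (D : Int) ≤ q * (D : Int) :=
      mul_le_mul_of_nonneg_right (by omega) (le_of_lt hDpos')
    nlinarith
  set c : Nat := q.toNat with hc
  have hcq : (c : Int) = q := Int.toNat_of_nonneg (by omega)
  set mN : Nat := ST - 1 + c with hmN
  have hcbound : c ≤ 9 * 10 ^ (D - 1) := by
    rw [← hst]
    omega
  have hcbound' : c - 1 ≤ 9 * 10 ^ (D - 1) := by omega
  have hm1 : digits ≤ (pvL mN : Int) := by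
    have hblk := pvL_block D hdpos c hcbound
    rw [← hst, ← htot] at hblk
    rw [hmN, hblk]
    push_cast
    rw [hcq]
    linarith
  have hm2 : ∀ j, j < mN → (pvL j : Int) < digits := by
    intro j hj
    have hjle : j ≤ ST - 1 + (c - 1) := by omega
    have hLle : pvL j ≤ pvL (ST - 1 + (c - 1)) := pvL_mono hjle
    have hblk := pvL_block D hdpos (c - 1) hcbound'
    rw [← hst, ← htot] at hblk
    rw [hblk] at hLle
    have h1c : (1 : Nat) ≤ c := by omega
    zify [h1c] at hLle
    rw [hcq] at hLle
    linarith
  have hmN1 : 1 ≤ mN := by omega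
  have hmfuel : mN ≤ digits.toNat := by
    have hlast := hm2 (mN - 1) (by omega)
    have hge := pvL_ge (mN - 1)
    omega
  have hA : pvALoop digits [] 1 digits.toNat = pvS mN := by
    have := pvALoop_eq digits mN hm1 hm2 digits.toNat 0 (by omega) (by omega)
    simpa [pvS] using this
  rw [hA, show (ST : Int) + q - 1 + 1 = ((mN : Nat) : Int) + 1 from by
    rw [hmN]; push_cast [← hcq]; omega, pvJoin_eq mN]
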